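-- pv_equiv track=rewrite | github.com/ideyedi/Algorithm | CodingTest/21-g-problem/problem2.py | solution
-- ===== SOURCE A (Python) =====
-- grad = [[0, 'A+'], [1, 'A0'], [2, 'A-'], [3, 'B+'], [4, 'B0'], [5, 'B-'], [6, 'C+'],
--         [7, 'C0'], [8, 'C-'], [9, 'D+'], [10, 'D0'], [11, 'D-'], [12, 'F']]
--
-- def findGradeW(grade):
--     ret = -1
--     for item in grad:
--         if item[1] == grade:
--             ret = item[0]
--             break
--     return ret
--
-- def gradeCheck(prev, post):
--     ret = False
--
--     if findGradeW(prev) > findGradeW(post):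
--         ret = True
--
--     return ret
--
-- def solution(grades):
--     answer = []
--     dic = {}
--     new = {}
--
--     for g in grades:
--         ls = g.split(' ')
--         try:
--             if gradeCheck(dic[ls[0]], ls[1]):
--                 del dic[ls[0]]
--                 dic[ls[0]] = ls[1]
--         except:
--             dic[ls[0]] = ls[1]
--
--     for item in dic.items():
--         ret = findGradeW(item[1])
--         tmp = [item[1], ret]
--         new[item[0]] = tmp
--
--     new = sorted(new.items(), key=lambda x:x[1])
--     for item in new:
--         tmp = item[0] + ' ' + item[1][0]
--         answer.append(tmp)
--
--     return answer
-- ===== SOURCE B (Python) =====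
-- GRADE_ORDER = ['A+', 'A0', 'A-', 'B+', 'B0', 'B-', 'C+', 'C0', 'C-', 'D+', 'D0', 'D-', 'F']
-- RANK = {g: i for i, g in enumerate(GRADE_ORDER)}
--
-- def solution(grades):
--     # collect-then-reduce: gather EVERY graded line per name, then pick each
--     # name's winner as the minimum of its ((rank, line index), grade) records.
--     occ = {}
--     for i, line in enumerate(grades):
--         parts = line.split(' ')
--         name, grade = parts[0], parts[1]
--         occ.setdefault(name, []).append(((RANK.get(grade, -1), i), grade))
--     winners = [(name, min(recs, key=lambda t: t[0])) for name, recs in occ.items()]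
--     winners.sort(key=lambda t: (t[1][1], t[1][0][1]))
--     return [name + ' ' + w[1] for name, w in winners]
-- ===== Notes on version B (the rewrite author's own statement) =====
-- stated objective: alternative
-- what changed: A's incremental replace-if-strictly-better dict pass (with del+reinsert), a second rebuild pass attaching ranks, and a stable sort keyed on (grade string, rank) are replaced by a collect-then-reduce scheme: one pass groups every ((rank, line index), grade) record per name, each name's winner is then a single min over its records, and one sort keyed on (grade string, winning line index) orders the output.
-- outside the precondition, e.g. on solution(['x']): A raises IndexError, B raises IndexError
import Mathlib
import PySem

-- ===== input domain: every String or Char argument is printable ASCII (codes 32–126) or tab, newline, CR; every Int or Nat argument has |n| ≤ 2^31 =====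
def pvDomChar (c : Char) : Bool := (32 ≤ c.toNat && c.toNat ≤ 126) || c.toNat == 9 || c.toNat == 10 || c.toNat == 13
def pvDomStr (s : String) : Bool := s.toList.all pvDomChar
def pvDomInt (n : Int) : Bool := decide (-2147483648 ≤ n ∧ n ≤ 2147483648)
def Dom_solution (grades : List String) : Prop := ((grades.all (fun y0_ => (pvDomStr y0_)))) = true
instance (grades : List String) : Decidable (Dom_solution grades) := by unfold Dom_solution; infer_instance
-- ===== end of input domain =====

-- B replaces A's replace-if-better dict pass + rebuild + stable sort on (grade, rank) by a
-- collect-then-reduce scheme: group every ((rank, index), grade) record per name, take each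
-- name's winner as one min over its records, and sort once on (grade string, winning index)
-- (objective: alternative decomposition; same output).


-- ===== PORT A =====
def grad : List (Int × String) :=
  [(0, "A+"), (1, "A0"), (2, "A-"), (3, "B+"), (4, "B0"), (5, "B-"), (6, "C+"),
   (7, "C0"), (8, "C-"), (9, "D+"), (10, "D0"), (11, "D-"), (12, "F")]

-- A's linear scan with break: first matching rank, else -1
def findGradeWGo (grade : String) : List (Int × String) → Int
  | [] => -1
  | item :: rest => if item.2 == grade then item.1 else findGradeWGo grade rest

def findGradeW (grade : String) : Int := findGradeWGo grade grad

def gradeCheck (prev post : String) : Bool :=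
  if findGradeW prev > findGradeW post then true else false

-- loop body of A's first loop (try dic[ls[0]] / except → insert; del+reinsert on improvement)
def stepA (dic : PySem.Dict String String) (g : String) : PySem.Dict String String :=
  let ls := (PySem.Str.split? g " ").getD []   -- sep " " ≠ "": split? is always some here
  let name := PySem.List.pyGetD ls 0 ""   -- ls[0]: split(' ') is never empty
  let grade := PySem.List.pyGetD ls 1 ""  -- ls[1]: IndexError when absent — excluded by Pre_
  match dic.get? name with                -- try dic[ls[0]] … except KeyError
  | some prev => if gradeCheck prev grade then (dic.erase name).insert name grade else dic
  | none => dic.insert name grade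

def solution (grades : List String) : List String :=
  let dic := grades.foldl stepA PySem.Dict.empty
  let newd := dic.items.foldl (fun nd item =>
    nd.insert item.1 (item.2, findGradeW item.2))
    (PySem.Dict.empty : PySem.Dict String (String × Int))
  let sortedNew := PySem.List.sorted2 newd.items (fun x => x.2.1) (fun x => x.2.2)
  sortedNew.foldl (fun answer item => answer ++ [item.1 ++ " " ++ item.2.1]) []

-- ===== PORT B =====
def gradeRank : PySem.Dict String Int :=
  PySem.Dict.ofList [("A+", 0), ("A0", 1), ("A-", 2), ("B+", 3), ("B0", 4), ("B-", 5), ("C+", 6),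
                     ("C0", 7), ("C-", 8), ("D+", 9), ("D0", 10), ("D-", 11), ("F", 12)]

-- loop body of B's grouping pass: occ.setdefault(name, []).append(((rank, i), grade))
-- (insert on an existing key overwrites in place, so the dict order is first-appearance order)
def stepB (occ : PySem.Dict String (List ((Int × Int) × String))) (p : Int × String) :
    PySem.Dict String (List ((Int × Int) × String)) :=
  let parts := (PySem.Str.split? p.2 " ").getD []  -- sep " " ≠ "": split? is always some here
  let name := PySem.List.pyGetD parts 0 ""
  let grade := PySem.List.pyGetD parts 1 ""
  let rc := ((gradeRank.getD grade (-1), p.1), grade)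
  match occ.get? name with
  | none => occ.insert name [rc]
  | some l => occ.insert name (l ++ [rc])

def solution_alt (grades : List String) : List String :=
  let occ := (PySem.List.enumerate grades).foldl stepB PySem.Dict.empty
  let winners := occ.items.map (fun p =>
    (p.1, (PySem.List.min2? p.2 (fun t => t.1.1) (fun t => t.1.2)).getD ((-1, -1), "")))
    -- min(recs, key=lambda t: t[0]); every stored record list is nonempty, so the default never shows
  let winners := PySem.List.sorted2 winners (fun t => t.2.2) (fun t => t.2.1.2)
  winners.map (fun t => t.1 ++ " " ++ t.2.2)

-- ===== PRECONDITION & SPEC =====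
-- Pre_ excludes exactly the lines without a second ' '-separated field, on which Python A
-- raises IndexError (and B raises too).
def Pre_solution (grades : List String) : Prop :=
  ∀ g ∈ grades, 2 ≤ ((PySem.Str.split? g " ").getD []).length
instance (grades : List String) : Decidable (Pre_solution grades) := by
  unfold Pre_solution; infer_instance

def pvWitness_solution : List String := ["bob C0", "alice A0", "bob B+", "dave ZZ"]

def Spec_solution (grades : List String) (out : List String) : Prop := out = solution_alt grades
instance (grades : List String) (out : List String) : Decidable (Spec_solution grades out) := by
  unfold Spec_solution; infer_instance

-- ===== CLAIM (what is proved, stated in full; the proofs are below) =====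
def Claim_equal_solution : Prop := ∀ (grades : List String), Dom_solution grades →
  Pre_solution grades → Spec_solution grades (solution grades)


-- ===== LEMMAS AND PROOFS =====

-- a winner record kept by B: ((rank, line index), grade)
-- the winner B's second stage extracts from one name's record list
def pvWinV (l : List ((Int × Int) × String)) : (Int × Int) × String :=
  (PySem.List.min2? l (fun t => t.1.1) (fun t => t.1.2)).getD ((-1, -1), "")

def pvWin (p : String × List ((Int × Int) × String)) : String × ((Int × Int) × String) :=
  (p.1, pvWinV p.2)

-- the pair A's dict keeps for that entry
def pvProjA (kv : String × ((Int × Int) × String)) : String × String := (kv.1, kv.2.2)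

-- joint loop invariant: L is A's dict annotated with B's winner fields, in A's dict order
-- (ascending winning-line index); the winners of B's grouping dict are a permutation of L.
def pvInv (L : List (String × ((Int × Int) × String)))
    (O : List (String × List ((Int × Int) × String))) (i : Int) : Prop :=
  L.Perm (O.map pvWin) ∧
  L.Pairwise (fun a b => a.2.1.2 < b.2.1.2) ∧
  (∀ kv ∈ L, kv.2.1.1 = findGradeW kv.2.2) ∧
  (L.map (·.1)).Nodup ∧
  (∀ kv ∈ L, kv.2.1.2 < i) ∧
  (∀ p ∈ O, p.2 ≠ [])

-- B's dict rank lookup computes A's linear scan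
theorem pvLookup_swap (l : List (Int × String)) (g : String) :
    (PySem.Dict.mk (l.map (fun p => (p.2, p.1)))).getD g (-1) = findGradeWGo g l := by
  induction l with
  | nil => rfl
  | cons p rest ih =>
    rw [PySem.Dict.getD_eq_get?_getD] at ih ⊢
    simp only [List.map_cons, PySem.Dict.get?_mk_cons, findGradeWGo]
    by_cases h : (p.2 == g) = true
    · simp [h]
    · simp only [h, if_false, Bool.false_eq_true]
      exact ih

theorem pvRank_eq (g : String) : gradeRank.getD g (-1) = findGradeW g := by
  have h : gradeRank = PySem.Dict.mk (grad.map (fun p => (p.2, p.1))) := by decide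
  rw [h]
  exact pvLookup_swap grad g

theorem pvInsertBy_congr {α : Type} (b1 b2 : α → α → Bool) (x : α) :
    ∀ acc : List α, (∀ y ∈ acc, b1 x y = b2 x y) →
    PySem.List.insertBy b1 x acc = PySem.List.insertBy b2 x acc := by
  intro acc
  induction acc with
  | nil => intro _; rfl
  | cons y ys ih =>
    intro h
    show (if b1 x y then x :: y :: ys else y :: PySem.List.insertBy b1 x ys) =
         (if b2 x y then x :: y :: ys else y :: PySem.List.insertBy b2 x ys)
    rw [h y (List.mem_cons_self ..), ih (fun z hz => h z (List.mem_cons_of_mem _ hz))]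

theorem pvFoldl_insertBy_congr {α : Type} (b1 b2 : α → α → Bool) :
    ∀ (xs acc : List α),
    (∀ a ∈ xs, ∀ y ∈ acc, b1 a y = b2 a y) →
    xs.Pairwise (fun y a => b1 a y = b2 a y) →
    xs.foldl (fun acc x => PySem.List.insertBy b1 x acc) acc =
      xs.foldl (fun acc x => PySem.List.insertBy b2 x acc) acc := by
  intro xs
  induction xs with
  | nil => intro acc _ _; rfl
  | cons x xs ih =>
    intro acc hacc hpw
    have hpw' := List.pairwise_cons.mp hpw
    simp only [List.foldl_cons]
    rw [pvInsertBy_congr b1 b2 x acc (fun y hy => hacc x (List.mem_cons_self ..) y hy)]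
    exact ih _ (fun a ha y hy => by
        rcases (PySem.List.mem_insertBy ..).mp hy with rfl | hy'
        · exact hpw'.1 a ha
        · exact hacc a (List.mem_cons_of_mem _ ha) y hy')
      hpw'.2

-- two keys inducing the same strict comparisons sort identically
theorem pvSorted_congr {α κ₁ κ₂ : Type} [LinearOrder κ₁] [LinearOrder κ₂]
    (xs : List α) (k1 : α → κ₁) (k2 : α → κ₂)
    (h : ∀ a b, k1 a < k1 b ↔ k2 a < k2 b) :
    PySem.List.sorted xs k1 = PySem.List.sorted xs k2 := by
  show xs.foldl (fun acc x => PySem.List.insertBy _ x acc) [] =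
       xs.foldl (fun acc x => PySem.List.insertBy _ x acc) []
  exact pvFoldl_insertBy_congr _ _ xs [] (by intro a _ y hy; cases hy)
    (List.pairwise_iff_forall_sublist.mpr (fun _ => decide_eq_decide.mpr (h _ _)))

-- refining a stable sort's key by a strictly input-increasing index changes nothing
theorem pvSorted_stab {α κ : Type} [LinearOrder κ] (xs : List α) (key : α → κ) (idx : α → Int)
    (hidx : xs.Pairwise (fun a b => idx a < idx b)) :
    PySem.List.sorted xs key = PySem.List.sorted xs (fun a => toLex (key a, idx a)) := by
  show xs.foldl (fun acc x => PySem.List.insertBy _ x acc) [] =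
       xs.foldl (fun acc x => PySem.List.insertBy _ x acc) []
  refine pvFoldl_insertBy_congr _ _ xs [] (by intro a _ y hy; cases hy) (hidx.imp ?_)
  intro y a hlt
  refine decide_eq_decide.mpr ?_
  rw [Prod.Lex.lt_iff]
  constructor
  · exact fun h => Or.inl h
  · rintro (h | ⟨-, h⟩)
    · exact h
    · exact absurd hlt (not_lt_of_gt h)

theorem pvInsertBy_map {α β : Type} (f : α → β) (b : β → β → Bool) (x : α) :
    ∀ ys : List α, PySem.List.insertBy b (f x) (ys.map f) =
      (PySem.List.insertBy (fun p q => b (f p) (f q)) x ys).map f := by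
  intro ys
  induction ys with
  | nil => rfl
  | cons y ys ih =>
    show (if b (f x) (f y) then f x :: f y :: ys.map f
          else f y :: PySem.List.insertBy b (f x) (ys.map f)) =
         (if b (f x) (f y) then x :: y :: ys
          else y :: PySem.List.insertBy (fun p q => b (f p) (f q)) x ys).map f
    by_cases h : b (f x) (f y) <;> simp [h, ih]

theorem pvSorted_map {α β κ : Type} [LinearOrder κ] (f : α → β) (key : β → κ) (xs : List α) :
    PySem.List.sorted (xs.map f) key = (PySem.List.sorted xs (fun a => key (f a))).map f := by
  show (xs.map f).foldl (fun acc x => PySem.List.insertBy _ x acc) [] =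
       (xs.foldl (fun acc x => PySem.List.insertBy _ x acc) []).map f
  have : ∀ (xs : List α) (acc : List α),
      (xs.map f).foldl (fun acc x => PySem.List.insertBy (fun a b => decide (key a < key b)) x acc) (acc.map f) =
      (xs.foldl (fun acc x => PySem.List.insertBy (fun a b => decide (key (f a) < key (f b))) x acc) acc).map f := by
    intro xs
    induction xs with
    | nil => intro acc; rfl
    | cons x xs ih =>
      intro acc
      simp only [List.map_cons, List.foldl_cons, pvInsertBy_map f _ x acc]
      exact ih _
  exact this xs []

-- sorted2 (Python's tuple key) is sorted with the lexicographic product key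
theorem pvSorted2_lex {α κ₁ κ₂ : Type} [LinearOrder κ₁] [LinearOrder κ₂]
    (xs : List α) (k1 : α → κ₁) (k2 : α → κ₂) :
    PySem.List.sorted2 xs k1 k2 = PySem.List.sorted xs (fun a => toLex (k1 a, k2 a)) := by
  show xs.foldl (fun acc x => PySem.List.insertBy
      (fun a b => decide (k1 a < k1 b) || (!decide (k1 b < k1 a) && decide (k2 a < k2 b))) x acc) [] =
    xs.foldl (fun acc x => PySem.List.insertBy _ x acc) []
  refine pvFoldl_insertBy_congr _ _ xs [] (by intro a _ y hy; cases hy)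
    (List.pairwise_iff_forall_sublist.mpr (fun {a y} _ => ?_))
  rcases lt_trichotomy (k1 y) (k1 a) with h | h | h
  · have h2 : toLex (k1 y, k2 y) < toLex (k1 a, k2 a) := Prod.Lex.lt_iff.mpr (Or.inl h)
    simp [h, h2]
  · have h2 : (toLex (k1 y, k2 y) < toLex (k1 a, k2 a)) ↔ k2 y < k2 a := by
      rw [Prod.Lex.lt_iff]; simp [h]
    simp only [h] at h2
    simp [h, h2]
  · have h2 : ¬ (toLex (k1 y, k2 y) < toLex (k1 a, k2 a)) := by
      intro hc
      rcases Prod.Lex.lt_iff.mp hc with hlt | ⟨heq, -⟩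
      · exact absurd hlt (not_lt_of_gt h)
      · exact absurd heq (ne_of_gt h)
    simp [lt_asymm h, h, h2]

-- collapsing the rank component (a function of the grade) out of A's sort key
theorem pvLexCollapse {α κ : Type} [LinearOrder κ] (f : κ → Int) (g : α → κ) (idx : α → Int)
    (a b : α) :
    (toLex (toLex (g a, f (g a)), idx a) < toLex (toLex (g b, f (g b)), idx b) ↔
      toLex (g a, idx a) < toLex (g b, idx b)) := by
  simp only [Prod.Lex.lt_iff, ofLex_toLex, toLex_inj, Prod.mk.injEq]
  constructor
  · rintro ((h | ⟨h, h'⟩) | ⟨⟨h, -⟩, h'⟩)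
    · exact Or.inl h
    · rw [h] at h'; exact absurd h' (lt_irrefl _)
    · exact Or.inr ⟨h, h'⟩
  · rintro (h | ⟨h, h'⟩)
    · exact Or.inl (Or.inl h)
    · exact Or.inr ⟨⟨h, by rw [h]⟩, h'⟩

-- looking a key up through a value-mapped association list
theorem pvGet?_map {ν μ : Type} (w : ν → μ) :
    ∀ (O : List (String × ν)) (k : String),
    (PySem.Dict.mk (O.map (fun p => (p.1, w p.2)))).get? k = ((PySem.Dict.mk O).get? k).map w := by
  intro O
  induction O with
  | nil => intro k; rfl
  | cons kv rest ih =>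
    intro k
    obtain ⟨n, v⟩ := kv
    simp only [List.map_cons, PySem.Dict.get?_mk_cons]
    by_cases h : (n == k) = true
    · simp [h]
    · simp only [h, Bool.false_eq_true, if_false]
      exact ih k

theorem pvGet?_perm {ν : Type} (L bi : List (String × ν))
    (hp : L.Perm bi) (hnd : (L.map (·.1)).Nodup) (k : String) :
    (PySem.Dict.mk L).get? k = (PySem.Dict.mk bi).get? k := by
  have hndb : (bi.map (·.1)).Nodup := ((hp.map (·.1)).nodup_iff).mp hnd
  cases h : (PySem.Dict.mk L).get? k with
  | some v =>
    have hm : (k, v) ∈ L := PySem.Dict.mem_items_of_get?_eq_some _ h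
    exact (PySem.Dict.get?_of_mem_items _ (hp.subset hm) hndb).symm
  | none =>
    have : k ∉ bi.map (·.1) := fun hk =>
      ((PySem.Dict.get?_eq_none_iff_not_mem_keys (PySem.Dict.mk L) k).mp h)
        ((hp.map (·.1)).mem_iff.mpr hk)
    exact ((PySem.Dict.get?_eq_none_iff_not_mem_keys (PySem.Dict.mk bi) k).mpr this).symm

-- rewriting one keyed entry of an association list with unique keys
theorem pvMapModify_eq {ν : Type} (W w1 w2 : List (String × ν)) (name : String) (m x : ν)
    (hW : W = w1 ++ (name, m) :: w2) (hnd : (W.map (·.1)).Nodup) :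
    W.map (fun q => if q.1 == name then (name, x) else q) = w1 ++ (name, x) :: w2 := by
  subst hW
  have hnm : name ∉ (w1 ++ w2).map (·.1) := by
    have hk : (w1 ++ (name, m) :: w2).map (·.1) = w1.map (·.1) ++ name :: w2.map (·.1) := by simp
    rw [hk] at hnd
    have := (List.nodup_cons.mp (List.nodup_middle.mp hnd)).1
    rw [List.map_append]
    exact this
  rw [List.map_append, List.map_cons]
  congr 1
  · refine (List.map_congr_left ?_).trans (List.map_id _)
    intro p hp
    have : p.1 ≠ name := fun hpe =>
      hnm (by rw [List.map_append]; exact List.mem_append_left _ (List.mem_map.mpr ⟨p, hp, hpe⟩))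
    simp [this]
  · congr 1
    · simp
    · refine (List.map_congr_left ?_).trans (List.map_id _)
      intro p hp
      have : p.1 ≠ name := fun hpe =>
        hnm (by rw [List.map_append]; exact List.mem_append_right _ (List.mem_map.mpr ⟨p, hp, hpe⟩))
      simp [this]

theorem pvFilter_eq {ν : Type} (W w1 w2 : List (String × ν)) (name : String) (m : ν)
    (hW : W = w1 ++ (name, m) :: w2) (hnd : (W.map (·.1)).Nodup) :
    W.filter (fun q => !(q.1 == name)) = w1 ++ w2 := by
  subst hW
  have hnm : name ∉ (w1 ++ w2).map (·.1) := by
    have hk : (w1 ++ (name, m) :: w2).map (·.1) = w1.map (·.1) ++ name :: w2.map (·.1) := by simp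
    rw [hk] at hnd
    have := (List.nodup_cons.mp (List.nodup_middle.mp hnd)).1
    rw [List.map_append]
    exact this
  rw [List.filter_append, List.filter_cons]
  simp only [BEq.rfl, Bool.not_true, Bool.false_eq_true, if_false]
  have e1 : w1.filter (fun q => !(q.1 == name)) = w1 := by
    refine List.filter_eq_self.mpr ?_
    intro p hp
    have : p.1 ≠ name := fun hpe =>
      hnm (by rw [List.map_append]; exact List.mem_append_left _ (List.mem_map.mpr ⟨p, hp, hpe⟩))
    simp [this]
  have e2 : w2.filter (fun q => !(q.1 == name)) = w2 := by
    refine List.filter_eq_self.mpr ?_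
    intro p hp
    have : p.1 ≠ name := fun hpe =>
      hnm (by rw [List.map_append]; exact List.mem_append_right _ (List.mem_map.mpr ⟨p, hp, hpe⟩))
    simp [this]
  rw [e1, e2]

-- min over an appended record: the appended record wins exactly when strictly smaller
theorem pvMin2_append (l : List ((Int × Int) × String)) (x m : (Int × Int) × String)
    (h : PySem.List.min2? l (fun t => t.1.1) (fun t => t.1.2) = some m) :
    PySem.List.min2? (l ++ [x]) (fun t => t.1.1) (fun t => t.1.2) =
      if (decide (x.1.1 < m.1.1) || (!decide (m.1.1 < x.1.1) && decide (x.1.2 < m.1.2))) = true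
      then some x else some m := by
  simp only [PySem.List.min2?] at h ⊢
  rw [List.foldl_append, h]
  rfl

-- a nonempty record list always has a winner
theorem pvFoldl_isSome {α : Type} (g : Option α → α → Option α)
    (hg : ∀ (m : α) (x : α), ∃ v, g (some m) x = some v) :
    ∀ (t : List α) (x : α), (t.foldl g (some x)).isSome = true := by
  intro t
  induction t with
  | nil => intro x; rfl
  | cons b t ih =>
    intro x
    rw [List.foldl_cons]
    obtain ⟨v, hv⟩ := hg x b
    rw [hv]
    exact ih v

theorem pvMin2_isSome (l : List ((Int × Int) × String)) (hl : l ≠ []) :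
    (PySem.List.min2? l (fun t => t.1.1) (fun t => t.1.2)).isSome := by
  cases l with
  | nil => exact absurd rfl hl
  | cons a t =>
    simp only [PySem.List.min2?, List.foldl_cons]
    exact pvFoldl_isSome _ (fun m x => by dsimp only; split <;> exact ⟨_, rfl⟩) t a

-- the loop bodies with the name and grade already extracted (definitionally equal forms)
def stepA1 (dic : PySem.Dict String String) (name grade : String) : PySem.Dict String String :=
  match dic.get? name with
  | some prev => if gradeCheck prev grade then (dic.erase name).insert name grade else dic
  | none => dic.insert name grade

def stepB1 (occ : PySem.Dict String (List ((Int × Int) × String))) (name grade : String)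
    (i : Int) : PySem.Dict String (List ((Int × Int) × String)) :=
  match occ.get? name with
  | none => occ.insert name [((gradeRank.getD grade (-1), i), grade)]
  | some l => occ.insert name (l ++ [((gradeRank.getD grade (-1), i), grade)])

theorem pvStepA_eq (dic : PySem.Dict String String) (g : String) :
    stepA dic g = stepA1 dic (PySem.List.pyGetD ((PySem.Str.split? g " ").getD []) 0 "")
      (PySem.List.pyGetD ((PySem.Str.split? g " ").getD []) 1 "") := rfl

theorem pvStepB_eq (occ : PySem.Dict String (List ((Int × Int) × String))) (i : Int) (g : String) :
    stepB occ (i, g) = stepB1 occ (PySem.List.pyGetD ((PySem.Str.split? g " ").getD []) 0 "")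
      (PySem.List.pyGetD ((PySem.Str.split? g " ").getD []) 1 "") i := rfl

-- one joint step of A's first loop and B's grouping loop
theorem pvStep (L : List (String × ((Int × Int) × String)))
    (O : List (String × List ((Int × Int) × String))) (i : Int) (name grade : String)
    (hInv : pvInv L O i) :
    ∃ L', pvInv L' (stepB1 (PySem.Dict.mk O) name grade i).items (i + 1) ∧
      stepA1 (PySem.Dict.mk (L.map pvProjA)) name grade =
        PySem.Dict.mk (L'.map pvProjA) := by
  obtain ⟨hperm, hpw, hrk, hnd, hlt, hne⟩ := hInv
  set rc : (Int × Int) × String := ((gradeRank.getD grade (-1), i), grade) with hrc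
  -- keys through the two value maps
  have hWkeys : ((O.map pvWin).map (·.1)) = O.map (·.1) := by
    rw [List.map_map]; rfl
  have hWnd : ((O.map pvWin).map (·.1)).Nodup := ((hperm.map (·.1)).nodup_iff).mp hnd
  have hprojA : L.map pvProjA = L.map (fun p => (p.1, p.2.2)) := rfl
  have hgetA : ∀ k, (PySem.Dict.mk (L.map pvProjA)).get? k =
      ((PySem.Dict.mk L).get? k).map (fun v => v.2) := by
    intro k
    exact pvGet?_map (fun v => v.2) L k
  have hgetW : ∀ k, (PySem.Dict.mk (O.map pvWin)).get? k =
      ((PySem.Dict.mk O).get? k).map pvWinV := by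
    intro k
    exact pvGet?_map pvWinV O k
  have hLW : ∀ k, (PySem.Dict.mk L).get? k = (PySem.Dict.mk (O.map pvWin)).get? k :=
    pvGet?_perm L (O.map pvWin) hperm hnd
  cases hb : (PySem.Dict.mk O).get? name with
  | none =>
    -- fresh name: both sides append
    have hLnone : (PySem.Dict.mk L).get? name = none := by
      rw [hLW, hgetW, hb]; rfl
    have hsA : stepA1 (PySem.Dict.mk (L.map pvProjA)) name grade =
        (PySem.Dict.mk (L.map pvProjA)).insert name grade := by
      unfold stepA1
      rw [hgetA, hLnone]
      rfl
    have hsB : stepB1 (PySem.Dict.mk O) name grade i = (PySem.Dict.mk O).insert name [rc] := by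
      unfold stepB1
      rw [hb]
    have hcontA : (PySem.Dict.mk (L.map pvProjA)).contains name = false := by
      rw [PySem.Dict.contains_eq_isSome_get?, hgetA, hLnone]; rfl
    have hcontB : (PySem.Dict.mk O).contains name = false := by
      rw [PySem.Dict.contains_eq_isSome_get?, hb]; rfl
    have hnmem : name ∉ L.map (·.1) :=
      (PySem.Dict.get?_eq_none_iff_not_mem_keys (PySem.Dict.mk L) name).mp hLnone
    refine ⟨L ++ [(name, rc)], ?_, ?_⟩
    · rw [hsB, PySem.Dict.items_insert_of_not_contains _ _ hcontB]
      refine ⟨?_, ?_, ?_, ?_, ?_, ?_⟩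
      · rw [List.map_append]
        exact hperm.append_right _
      · refine List.pairwise_append.mpr ⟨hpw, List.pairwise_singleton .., ?_⟩
        intro a ha b hbm
        rw [List.mem_singleton] at hbm
        subst hbm
        exact hlt a ha
      · intro kv hkv
        rcases List.mem_append.mp hkv with h | h
        · exact hrk kv h
        · rw [List.mem_singleton] at h
          subst h
          exact pvRank_eq grade
      · rw [List.map_append]
        refine List.Nodup.append hnd (List.nodup_singleton _) ?_
        intro x hx hx'
        simp only [List.map_cons, List.map_nil, List.mem_singleton] at hx'
        subst hx'
        exact hnmem hx
      · intro kv hkv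
        rcases List.mem_append.mp hkv with h | h
        · exact lt_trans (hlt kv h) (by omega)
        · rw [List.mem_singleton] at h
          subst h
          show i < i + 1
          omega
      · intro p hp
        rcases List.mem_append.mp hp with h | h
        · exact hne p h
        · rw [List.mem_singleton] at h
          subst h
          simp
    · rw [hsA]
      apply PySem.Dict.ext
      rw [PySem.Dict.items_insert_of_not_contains _ _ hcontA]
      simp [pvProjA, hrc]
  | some l =>
    -- known name: winner m of its records corresponds to A's stored grade
    set m : (Int × Int) × String := pvWinV l with hm
    have hLsome : (PySem.Dict.mk L).get? name = some m := by
      rw [hLW, hgetW, hb]; rfl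
    have hgA : (PySem.Dict.mk (L.map pvProjA)).get? name = some m.2 := by
      rw [hgetA, hLsome]; rfl
    have hmemO : (name, l) ∈ O := PySem.Dict.mem_items_of_get?_eq_some _ hb
    have hmemL : (name, m) ∈ L := hperm.mem_iff.mpr (List.mem_map.mpr ⟨(name, l), hmemO, rfl⟩)
    have hrkv : m.1.1 = findGradeW m.2 := hrk (name, m) hmemL
    have hiv : m.1.2 < i := hlt (name, m) hmemL
    have hlne : l ≠ [] := hne (name, l) hmemO
    have hmin : PySem.List.min2? l (fun t => t.1.1) (fun t => t.1.2) = some m := by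
      obtain ⟨v, hv⟩ := Option.isSome_iff_exists.mp (pvMin2_isSome l hlne)
      rw [hv, hm]
      simp [pvWinV, hv]
    have hr : gradeRank.getD grade (-1) = findGradeW grade := pvRank_eq grade
    -- the appended record wins exactly when A replaces
    have hwin : pvWinV (l ++ [rc]) = if gradeCheck m.2 grade then rc else m := by
      rw [pvWinV, pvMin2_append l rc m hmin]
      have h2 : decide (rc.1.2 < m.1.2) = false := by
        simp only [hrc]
        simp only [decide_eq_false_iff_not]
        omega
      have hcond : (decide (rc.1.1 < m.1.1) || (!decide (m.1.1 < rc.1.1) && decide (rc.1.2 < m.1.2)))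
          = gradeCheck m.2 grade := by
        rw [h2, Bool.and_false, Bool.or_false]
        simp only [hrc, gradeCheck, gt_iff_lt]
        simp only [hr, hrkv]
        by_cases hx : findGradeW grade < findGradeW m.2 <;> simp [hx]
      rw [hcond]
      by_cases hx : gradeCheck m.2 grade <;> simp [hx]
    have hcontB : (PySem.Dict.mk O).contains name = true := by
      rw [PySem.Dict.contains_eq_isSome_get?, hb]; rfl
    have hsB : stepB1 (PySem.Dict.mk O) name grade i = (PySem.Dict.mk O).insert name (l ++ [rc]) := by
      unfold stepB1
      rw [hb]
    -- B's dict after the step, through the winner map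
    have hitB : ((PySem.Dict.mk O).insert name (l ++ [rc])).items.map pvWin =
        (O.map pvWin).map (fun q => if q.1 == name then (name, pvWinV (l ++ [rc])) else q) := by
      rw [PySem.Dict.items_insert_of_contains _ _ hcontB]
      show (O.map (fun p => if p.1 == name then (name, l ++ [rc]) else p)).map pvWin = _
      rw [List.map_map, List.map_map]
      refine List.map_congr_left ?_
      intro p _
      by_cases h : p.1 = name
      · simp [pvWin, h]
      · simp [pvWin, h]
    -- nonemptiness survives the step
    have hneB : ∀ p ∈ ((PySem.Dict.mk O).insert name (l ++ [rc])).items, p.2 ≠ [] := by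
      intro p hp
      rcases (PySem.Dict.mem_items_insert ..).mp hp with h | ⟨h, -⟩
      · subst h
        simp [hlne]
      · exact hne p h
    -- decompose the winner list around name
    obtain ⟨w1, w2, hWdec⟩ := List.append_of_mem (List.mem_map.mpr ⟨(name, l), hmemO, rfl⟩)
    have hWdec' : O.map pvWin = w1 ++ (name, m) :: w2 := hWdec
    by_cases hgc : gradeCheck m.2 grade
    · -- replacement: A del+reinserts; B's winner flips to the new record
      have hsA : stepA1 (PySem.Dict.mk (L.map pvProjA)) name grade =
          ((PySem.Dict.mk (L.map pvProjA)).erase name).insert name grade := by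
        unfold stepA1
        rw [hgA]
        simp [hgc]
      have hwin' : pvWinV (l ++ [rc]) = rc := by rw [hwin, if_pos hgc]
      have hW' : ((PySem.Dict.mk O).insert name (l ++ [rc])).items.map pvWin =
          w1 ++ (name, rc) :: w2 := by
        rw [hitB, hwin']
        exact pvMapModify_eq (O.map pvWin) w1 w2 name m rc hWdec' hWnd
      have hfilW : (O.map pvWin).filter (fun q => !(q.1 == name)) = w1 ++ w2 :=
        pvFilter_eq (O.map pvWin) w1 w2 name m hWdec' hWnd
      have hfilperm : (L.filter (fun kv => !(kv.1 == name))).Perm (w1 ++ w2) := by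
        rw [← hfilW]
        exact hperm.filter _
      have hfilkeys : name ∉ (L.filter (fun kv => !(kv.1 == name))).map (·.1) := by
        intro hmem
        obtain ⟨kv, hkv, hkve⟩ := List.mem_map.mp hmem
        have := List.of_mem_filter hkv
        simp [hkve] at this
      refine ⟨L.filter (fun kv => !(kv.1 == name)) ++ [(name, rc)], ?_, ?_⟩
      · rw [hsB]
        refine ⟨?_, ?_, ?_, ?_, ?_, ?_⟩
        · rw [hW']
          refine (hfilperm.append_right _).trans ?_
          rw [List.append_assoc]
          exact ((List.perm_append_singleton _ _).append_left w1)
        · refine List.pairwise_append.mpr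
            ⟨hpw.sublist List.filter_sublist, List.pairwise_singleton .., ?_⟩
          intro a ha b hbm
          rw [List.mem_singleton] at hbm
          subst hbm
          exact hlt a (List.mem_of_mem_filter ha)
        · intro kv hkv
          rcases List.mem_append.mp hkv with h | h
          · exact hrk kv (List.mem_of_mem_filter h)
          · rw [List.mem_singleton] at h
            subst h
            exact pvRank_eq grade
        · rw [List.map_append]
          refine List.Nodup.append ?_ (List.nodup_singleton _) ?_
          · exact List.Sublist.nodup (List.Sublist.map _ List.filter_sublist) hnd
          · intro x hx hx'
            simp only [List.map_cons, List.map_nil, List.mem_singleton] at hx'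
            subst hx'
            exact hfilkeys hx
        · intro kv hkv
          rcases List.mem_append.mp hkv with h | h
          · exact lt_trans (hlt kv (List.mem_of_mem_filter h)) (by omega)
          · rw [List.mem_singleton] at h
            subst h
            show i < i + 1
            omega
        · exact hneB
      · -- A's dict: erase then insert appends
        have hfm : (L.map pvProjA).filter (fun p => !(p.1 == name)) =
            (L.filter (fun kv => !(kv.1 == name))).map pvProjA := by
          rw [List.filter_map]
          exact congrArg _ (List.filter_congr (fun kv _ => rfl))
        have herase : (PySem.Dict.mk (L.map pvProjA)).erase name =
            PySem.Dict.mk ((L.filter (fun kv => !(kv.1 == name))).map pvProjA) := by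
          apply PySem.Dict.ext
          exact hfm
        rw [hsA, herase]
        have hcont : (PySem.Dict.mk
            ((L.filter (fun kv => !(kv.1 == name))).map pvProjA)).contains name = false := by
          rw [PySem.Dict.contains_eq_decide_mem_keys]
          simp only [decide_eq_false_iff_not]
          intro hmem
          apply hfilkeys
          have : ((L.filter (fun kv => !(kv.1 == name))).map pvProjA).map (·.1) =
              (L.filter (fun kv => !(kv.1 == name))).map (·.1) := by
            rw [List.map_map]; rfl
          rw [← this]
          exact hmem
        apply PySem.Dict.ext
        rw [PySem.Dict.items_insert_of_not_contains _ _ hcont]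
        simp [pvProjA, hrc]
    · -- no replacement: A's dict unchanged; B's winner stays m
      have hsA : stepA1 (PySem.Dict.mk (L.map pvProjA)) name grade =
          PySem.Dict.mk (L.map pvProjA) := by
        unfold stepA1
        rw [hgA]
        simp [hgc]
      have hwin' : pvWinV (l ++ [rc]) = m := by
        rw [hwin, if_neg hgc]
      have hW' : ((PySem.Dict.mk O).insert name (l ++ [rc])).items.map pvWin = O.map pvWin := by
        rw [hitB, hwin', pvMapModify_eq (O.map pvWin) w1 w2 name m m hWdec' hWnd]
        exact hWdec'.symm
      refine ⟨L, ⟨?_, hpw, hrk, hnd, fun kv h => lt_trans (hlt kv h) (by omega), ?_⟩, hsA⟩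
      · rw [hsB, hW']
        exact hperm
      · rw [hsB]
        exact hneB

theorem pvMain : ∀ (rest : List String) (i : Int)
    (L : List (String × ((Int × Int) × String)))
    (O : List (String × List ((Int × Int) × String))),
    pvInv L O i →
    ∃ L', pvInv L' ((PySem.List.enumerate rest i).foldl stepB (PySem.Dict.mk O)).items
        (i + rest.length) ∧
      rest.foldl stepA (PySem.Dict.mk (L.map pvProjA)) = PySem.Dict.mk (L'.map pvProjA) := by
  intro rest
  induction rest with
  | nil =>
    intro i L O hInv
    exact ⟨L, by simpa using hInv, rfl⟩
  | cons g rest ih =>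
    intro i L O hInv
    obtain ⟨L1, hInv1, hA1⟩ := pvStep L O i
      (PySem.List.pyGetD ((PySem.Str.split? g " ").getD []) 0 "")
      (PySem.List.pyGetD ((PySem.Str.split? g " ").getD []) 1 "") hInv
    rw [← pvStepB_eq] at hInv1
    rw [← pvStepA_eq] at hA1
    obtain ⟨L', hInv', hA'⟩ := ih (i + 1) L1 ((stepB (PySem.Dict.mk O) (i, g)).items) hInv1
    refine ⟨L', ?_, ?_⟩
    · rw [PySem.List.enumerate_cons]
      simp only [List.foldl_cons]
      have : i + (g :: rest).length = (i + 1) + rest.length := by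
        simp; omega
      rw [this]
      exact hInv'
    · simp only [List.foldl_cons, hA1]
      exact hA'

-- the value A's second loop attaches to an entry
def pvPhi (kv : String × ((Int × Int) × String)) : String × String × Int :=
  (kv.1, (kv.2.2, findGradeW kv.2.2))

theorem pvAB (grades : List String) : solution grades = solution_alt grades := by
  obtain ⟨L, hInv, hA⟩ := pvMain grades 0 [] []
    ⟨List.Perm.refl _, List.Pairwise.nil, by simp, by simp, by simp, by simp⟩
  obtain ⟨hperm, hpw, hrk, hnd, -, -⟩ := hInv
  have hA' : grades.foldl stepA PySem.Dict.empty = PySem.Dict.mk (L.map pvProjA) := hA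
  have hperm' : L.Perm
      ((((PySem.List.enumerate grades 0).foldl stepB PySem.Dict.empty).items).map pvWin) := hperm
  -- A's second loop rebuilds the dict over fresh distinct keys
  have hfresh : ∀ a ∈ L.map pvProjA,
      (PySem.Dict.empty : PySem.Dict String (String × Int)).contains a.1 = false := by
    intro a _; rfl
  have hndk : ((L.map pvProjA).map (fun a => a.1)).Nodup := by
    rw [List.map_map]; exact hnd
  have hnewd2 : ((PySem.Dict.mk (L.map pvProjA)).items.foldl
      (fun nd item => nd.insert item.1 (item.2, findGradeW item.2))
      (PySem.Dict.empty : PySem.Dict String (String × Int))).items = L.map pvPhi := by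
    refine (PySem.Dict.items_foldl_insert_fresh (L.map pvProjA) (fun a => a.1)
      (fun a => (a.2, findGradeW a.2)) PySem.Dict.empty hfresh hndk).trans ?_
    show ([] : List (String × String × Int)) ++
        (L.map pvProjA).map (fun a => (a.1, a.2, findGradeW a.2)) = L.map pvPhi
    rw [List.nil_append, List.map_map]
    rfl
  -- the common target order: strictly increasing in (grade string, winning index)
  have hidxnd : (L.map (fun kv => kv.2.1.2)).Nodup :=
    (List.Pairwise.map _ (fun {a b} (h : a.2.1.2 < b.2.1.2) => h) hpw).imp (fun h => ne_of_lt h)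
  have hysnd : ((PySem.List.sorted L (fun kv => toLex (kv.2.2, kv.2.1.2))).map
      (fun kv => kv.2.1.2)).Nodup :=
    (((PySem.List.sorted_perm L _ false).map _).nodup_iff).mpr hidxnd
  have hpwlt : (PySem.List.sorted L (fun kv => toLex (kv.2.2, kv.2.1.2))).Pairwise
      (fun a b => toLex (a.2.2, a.2.1.2) < toLex (b.2.2, b.2.1.2)) := by
    refine ((PySem.List.sorted_pairwise L _).and (List.pairwise_map.mp hysnd)).imp ?_
    rintro a b ⟨hle, hne⟩
    refine lt_of_le_of_ne hle (fun he => hne ?_)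
    exact (Prod.ext_iff.mp (toLex_inj.mp he)).2
  have hsortbi : PySem.List.sorted
        ((((PySem.List.enumerate grades 0).foldl stepB PySem.Dict.empty).items).map pvWin)
        (fun kv => toLex (kv.2.2, kv.2.1.2)) =
      PySem.List.sorted L (fun kv => toLex (kv.2.2, kv.2.1.2)) :=
    PySem.List.sorted_eq_of_perm_of_pairwise_lt _ _ _
      ((PySem.List.sorted_perm L _ false).trans hperm') hpwlt
  have hkey : PySem.List.sorted L (fun a => toLex ((pvPhi a).2.1, (pvPhi a).2.2)) =
      PySem.List.sorted L (fun kv => toLex (kv.2.2, kv.2.1.2)) :=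
    (pvSorted_stab L _ (fun kv => kv.2.1.2) hpw).trans
      (pvSorted_congr L _ _
        (fun a b => pvLexCollapse findGradeW (fun kv => kv.2.2) (fun kv => kv.2.1.2) a b))
  calc solution grades
      = (PySem.List.sorted2 (L.map pvPhi) (fun x => x.2.1) (fun x => x.2.2)).map
          (fun item => item.1 ++ " " ++ item.2.1) := by
        simp only [solution]
        rw [hA', hnewd2, PySem.List.foldl_append_singleton_eq_map
          (fun item : String × String × Int => item.1 ++ " " ++ item.2.1)]
        rfl
    _ = (PySem.List.sorted (L.map pvPhi) (fun a => toLex (a.2.1, a.2.2))).map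
          (fun item => item.1 ++ " " ++ item.2.1) := by rw [pvSorted2_lex]
    _ = ((PySem.List.sorted L (fun a => toLex ((pvPhi a).2.1, (pvPhi a).2.2))).map pvPhi).map
          (fun item => item.1 ++ " " ++ item.2.1) := by rw [pvSorted_map]
    _ = ((PySem.List.sorted L (fun kv => toLex (kv.2.2, kv.2.1.2))).map pvPhi).map
          (fun item => item.1 ++ " " ++ item.2.1) := by rw [hkey]
    _ = (PySem.List.sorted L (fun kv => toLex (kv.2.2, kv.2.1.2))).map
          (fun kv => kv.1 ++ " " ++ kv.2.2) := by rw [List.map_map]; rfl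
    _ = (PySem.List.sorted
          ((((PySem.List.enumerate grades 0).foldl stepB PySem.Dict.empty).items).map pvWin)
          (fun kv => toLex (kv.2.2, kv.2.1.2))).map
          (fun kv => kv.1 ++ " " ++ kv.2.2) := by rw [hsortbi]
    _ = solution_alt grades := by
        simp only [solution_alt]
        rw [pvSorted2_lex]
        rfl

-- ===== VERDICT (by name: the statement is the Claim_ definition above) =====
theorem solution_spec : Claim_equal_solution := by
  intro grades _ _
  exact pvAB grades
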